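-- pv_equiv track=rewrite | github.com/Kecheng-Ye/My_Leetcode | Problem/By section/Sorting/Problem 1152/problem_1152.py | mostVisitedPattern
-- ===== SOURCE A (Python) =====
-- from typing import List
--
-- def mostVisitedPattern(username: List[str], timestamp: List[int], website: List[str]) -> List[str]:
--     total_lst = {}
--
--     for user, web, time in zip(username, website, timestamp):
--         if user not in total_lst:
--             total_lst[user] = []
--
--         total_lst[user].append((web, time))
--
--     max_count = 0
--     cur_max = ""
--     record = {}
--
--     for user, lst in total_lst.items():
--         lst.sort(key = lambda x : x[1])
--         n = len(lst)
--         Set = set()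
--
--         for i in range(n - 2):
--             for j in range(i + 1, n - 1):
--                 for k in range(j + 1, n):
--                     result = ",".join([lst[i][0], lst[j][0], lst[k][0]])
--
--                     if result in Set:
--                         continue
--
--                     Set.add(result)
--
--                     if result not in record:
--                         record[result] = 1;
--                     else:
--                         record[result] += 1
--
--                     if record[result] == max_count:
--                         cur_max = min(result, cur_max)
--                     elif record[result] > max_count:
--                         cur_max = result;
--                         max_count += 1
--
--     return cur_max.split(",")
-- ===== SOURCE B (Python) =====
-- def _collect(sites, i, r, prefix, out):
--     """Append to out, in index order, prefix extended by every length-r subsequence of sites[i:]."""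
--     if r == 0:
--         out.append(prefix)
--         return
--     if len(sites) - i < r:
--         return
--     _collect(sites, i + 1, r - 1, prefix + (sites[i],), out)
--     _collect(sites, i + 1, r, prefix, out)
--
--
-- def _subseqs(seq, r):
--     """All length-r subsequences of seq, recursively, in lexicographic index order."""
--     out = []
--     _collect(seq, 0, r, (), out)
--     return out
--
--
-- def mostVisitedPattern(username, timestamp, website):
--     # phase 1: group visits per user
--     visits = {}
--     for user, web, time in zip(username, website, timestamp):
--         visits.setdefault(user, []).append((time, web))
--     # phase 2: full frequency table of each user's distinct ordered triples
--     counts = {}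
--     for lst in visits.values():
--         lst.sort(key=lambda p: p[0])
--         sites = [web for _, web in lst]
--         patterns = {",".join(t) for t in _subseqs(sites, 3)}
--         for p in patterns:
--             counts[p] = counts.get(p, 0) + 1
--     # phase 3: selection
--     if not counts:
--         return [""]
--     best = min(counts, key=lambda p: (-counts[p], p))
--     return best.split(",")
-- ===== Notes on version B (the rewrite author's own statement) =====
-- stated objective: alternative
-- what changed: B replaces A's online running-max/lexicographic tie-break threaded through the index-based triple loops by a clean two-phase decomposition: it first builds the complete pattern-frequency table (deduping each user's ordered triples produced by a recursive subsequence enumerator) and then selects the answer in a separate final pass with min over (-count, pattern).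
import Mathlib
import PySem

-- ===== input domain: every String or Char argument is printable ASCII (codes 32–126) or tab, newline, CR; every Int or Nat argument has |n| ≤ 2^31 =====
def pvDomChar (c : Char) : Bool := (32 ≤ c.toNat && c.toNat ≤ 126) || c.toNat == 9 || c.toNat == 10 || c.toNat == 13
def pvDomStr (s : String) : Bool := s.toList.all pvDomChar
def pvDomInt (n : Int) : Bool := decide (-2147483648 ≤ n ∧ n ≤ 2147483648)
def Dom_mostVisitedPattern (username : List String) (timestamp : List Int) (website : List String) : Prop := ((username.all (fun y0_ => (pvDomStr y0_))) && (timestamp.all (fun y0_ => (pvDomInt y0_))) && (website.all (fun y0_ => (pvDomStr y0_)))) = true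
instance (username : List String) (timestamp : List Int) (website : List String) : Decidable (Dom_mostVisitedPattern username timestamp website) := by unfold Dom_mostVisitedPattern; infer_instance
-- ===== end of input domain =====

-- B rebuilds the full pattern-frequency table (recursive subsequence enumeration) and selects the
-- answer in a separate final pass, instead of A's online running-max/tie-break threaded through the
-- triple loops; objective: alternative decomposition, same exact results.

-- ===== PORT A =====
-- A's online update for one new (per-user deduplicated) pattern string r; state = (max_count, cur_max, record)
def pvStepA (st : Int × String × PySem.Dict String Int) (r : String) :
    Int × String × PySem.Dict String Int :=
  let record := if st.2.2.contains r then st.2.2.modify r 0 (· + 1) else st.2.2.insert r 1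
  if record.getD r 0 = st.1 then (st.1, min r st.2.1, record)
  else if st.1 < record.getD r 0 then (st.1 + 1, r, record)
  else (st.1, st.2.1, record)

-- A's body of the innermost k-loop: 'continue' when the pattern is already in the per-user Set
def pvStepASet (st : (Int × String × PySem.Dict String Int) × PySem.Set String) (r : String) :
    (Int × String × PySem.Dict String Int) × PySem.Set String :=
  if PySem.Set.contains st.2 r then st else (pvStepA st.1 r, PySem.Set.add st.2 r)

-- one iteration of A's outer 'for user, lst in total_lst.items()' loop
def pvUserA (st : Int × String × PySem.Dict String Int) (lst0 : List (String × Int)) :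
    Int × String × PySem.Dict String Int :=
  let lst := PySem.List.sorted lst0 (fun x => x.2)
  let n : Int := (lst.length : Int)
  ((PySem.List.pyRange 0 (n - 2)).foldl (fun s i =>
    (PySem.List.pyRange (i + 1) (n - 1)).foldl (fun s j =>
      (PySem.List.pyRange (j + 1) n).foldl (fun s k =>
        pvStepASet s (PySem.Str.join ","
          [(PySem.List.pyGetD lst i ("", 0)).1,
           (PySem.List.pyGetD lst j ("", 0)).1,
           (PySem.List.pyGetD lst k ("", 0)).1])) s) s)
    (st, PySem.Set.empty)).1

def mostVisitedPattern (username : List String) (timestamp : List Int) (website : List String) : List String :=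
  let total := (username.zip (website.zip timestamp)).foldl
    (fun (d : PySem.Dict String (List (String × Int))) uwt =>
      let d' := if d.contains uwt.1 then d else d.insert uwt.1 []
      d'.modify uwt.1 [] (fun l => l ++ [(uwt.2.1, uwt.2.2)]))
    PySem.Dict.empty
  let fin := total.items.foldl (fun st p => pvUserA st p.2) (0, "", PySem.Dict.empty)
  (PySem.Str.split? fin.2.1 ",").getD []

-- ===== PORT B =====
-- _collect(sites, i, r, prefix, out): appends prefix extended by every length-r subsequence of
-- sites[i:], in index order; the mutated 'out' list is modelled as an accumulator that is returned
def pvCollect (sites : List String) (i : Int) (r : Nat) (pre : List String)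
    (out : List (List String)) : List (List String) :=
  if r = 0 then out ++ [pre]
  else if (sites.length : Int) - i < (r : Int) then out
  else
    pvCollect sites (i + 1) r pre
      (pvCollect sites (i + 1) (r - 1) (pre ++ [PySem.List.pyGetD sites i ""]) out)
termination_by ((sites.length : Int) - i).toNat
decreasing_by all_goals omega

-- _subseqs(seq, r)
def pvSubseqsB (seq : List String) (r : Nat) : List (List String) :=
  pvCollect seq 0 r [] []

def mostVisitedPattern_alt (username : List String) (timestamp : List Int) (website : List String) : List String :=
  -- phase 1: group visits per user (setdefault(user, []).append((time, web)) = modify with default [])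
  let visits := (username.zip (website.zip timestamp)).foldl
    (fun (d : PySem.Dict String (List (Int × String))) uwt =>
      d.modify uwt.1 [] (fun l => l ++ [(uwt.2.2, uwt.2.1)]))
    PySem.Dict.empty
  -- phase 2: full frequency table of each user's distinct ordered triples
  let counts := visits.values.foldl
    (fun (c : PySem.Dict String Int) lst0 =>
      let lst := PySem.List.sorted lst0 (fun p => p.1)
      let sites := lst.map (fun p => p.2)
      let patterns := PySem.Set.ofList ((pvSubseqsB sites 3).map (fun t => PySem.Str.join "," t))
      patterns.foldl (fun c p => c.insert p (c.getD p 0 + 1)) c)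
    PySem.Dict.empty
  -- phase 3: selection
  if counts.items.isEmpty then [""]
  else
    match PySem.List.min2? counts.keys (fun p => -(counts.getD p 0)) (fun p => p) with
    | some best => (PySem.Str.split? best ",").getD []
    | none => [""]

-- ===== PRECONDITION & SPEC =====
def Spec_mostVisitedPattern (username : List String) (timestamp : List Int) (website : List String) (out : List String) : Prop := out = mostVisitedPattern_alt username timestamp website
instance (username : List String) (timestamp : List Int) (website : List String) (out : List String) : Decidable (Spec_mostVisitedPattern username timestamp website out) := by unfold Spec_mostVisitedPattern; infer_instance

-- ===== CLAIM (what is proved, stated in full; the proofs are below) =====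
def Claim_equal_mostVisitedPattern : Prop := ∀ (username : List String) (timestamp : List Int) (website : List String), Dom_mostVisitedPattern username timestamp website → Spec_mostVisitedPattern username timestamp website (mostVisitedPattern username timestamp website)

-- ===== LEMMAS AND PROOFS =====

-- ---------- proof-side definitions ----------

-- structural reference form of the subsequence enumeration (same lexicographic index order)
def pvSubseqs : List String → Nat → List (List String)
  | _, 0 => [[]]
  | [], _ + 1 => []
  | h :: rest, r + 1 => (pvSubseqs rest r).map (fun t => h :: t) ++ pvSubseqs rest (r + 1)

-- the per-user event list: the distinct joined triples, in first-occurrence order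
def pvEv (lst0 : List (String × Int)) : List String :=
  PySem.Set.ofList ((pvSubseqs ((PySem.List.sorted lst0 (fun x => x.2)).map (fun p => p.1)) 3).map
    (fun t => PySem.Str.join "," t))

-- the counter-building step shared by the reductions of both programs
def pvInc (c : PySem.Dict String Int) (p : String) : PySem.Dict String Int :=
  c.insert p (c.getD p 0 + 1)

-- value-mapped dict: relates A's (web, time) grouping to B's (time, web) grouping
def pvMapVal (d : PySem.Dict String (List (String × Int))) : PySem.Dict String (List (Int × String)) :=
  ⟨d.items.map (fun p => (p.1, p.2.map Prod.swap))⟩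

-- the elements a set-guarded loop actually processes
def pvNewOnes (S : PySem.Set String) : List String → List String
  | [] => []
  | r :: t => if PySem.Set.contains S r then pvNewOnes S t else r :: pvNewOnes (PySem.Set.add S r) t

-- min2?'s fold step with propositional conditions
def pvMinStep {α κ₁ κ₂ : Type} [LinearOrder κ₁] [LinearOrder κ₂]
    (k1 : α → κ₁) (k2 : α → κ₂) (acc : Option α) (x : α) : Option α :=
  match acc with
  | none => some x
  | some mm => if k1 x < k1 mm ∨ (¬ k1 mm < k1 x ∧ k2 x < k2 mm) then some x else some mm

-- ---------- pvSubseqs ----------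

lemma pvSubseqs_short : ∀ (xs : List String) (r : Nat), xs.length < r → pvSubseqs xs r = [] := by
  intro xs
  induction xs with
  | nil => intro r h; cases r with
    | zero => omega
    | succ r => rfl
  | cons h t ih =>
    intro r hr
    cases r with
    | zero => omega
    | succ r =>
      simp only [pvSubseqs]
      rw [ih r (by simp at hr ⊢; omega), ih (r+1) (by simp at hr ⊢; omega)]
      rfl

lemma pvSubseqs_one : ∀ (xs : List String), pvSubseqs xs 1 = xs.map (fun x => [x]) := by
  intro xs
  induction xs with
  | nil => rfl
  | cons h t ih => simp only [pvSubseqs, ih, List.map_cons]; rfl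

-- ---------- accumulator enumeration = structural enumeration ----------

lemma pvCollect_eq : ∀ (fuel : Nat) (sites : List String) (i : Int) (r : Nat)
    (pre : List String) (out : List (List String)),
    ((sites.length : Int) - i).toNat ≤ fuel → 0 ≤ i →
    pvCollect sites i r pre out
      = out ++ (pvSubseqs (sites.drop i.toNat) r).map (fun t => pre ++ t) := by
  intro fuel
  induction fuel with
  | zero =>
    intro sites i r pre out hf hi
    rw [pvCollect]
    cases r with
    | zero => simp [pvSubseqs]
    | succ r =>
      rw [if_neg (by omega), if_pos (by omega)]
      rw [pvSubseqs_short _ _ (by simp; omega)]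
      simp
  | succ fuel ih =>
    intro sites i r pre out hf hi
    rw [pvCollect]
    cases r with
    | zero => simp [pvSubseqs]
    | succ r =>
      rw [if_neg (by omega)]
      by_cases hsh : (sites.length : Int) - i < ((r + 1 : Nat) : Int)
      · rw [if_pos hsh]
        rw [pvSubseqs_short _ _ (by simp; omega)]
        simp
      · rw [if_neg hsh]
        have hilt : i.toNat < sites.length := by omega
        have hti : (i + 1).toNat = i.toNat + 1 := by omega
        rw [show r + 1 - 1 = r from rfl]
        rw [ih sites (i + 1) r (pre ++ [PySem.List.pyGetD sites i ""]) out (by omega) (by omega)]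
        rw [ih sites (i + 1) (r + 1) pre _ (by omega) (by omega)]
        have hget : PySem.List.pyGetD sites i "" = sites[i.toNat] := by
          rw [PySem.List.pyGetD_of_nonneg _ _ hi]
          simp [List.getElem?_eq_getElem hilt]
        rw [hget, hti, List.drop_eq_getElem_cons hilt]
        show _ = out ++ (pvSubseqs (sites[i.toNat] :: sites.drop (i.toNat + 1)) (r + 1)).map _
        rw [show pvSubseqs (sites[i.toNat] :: sites.drop (i.toNat + 1)) (r + 1)
            = (pvSubseqs (sites.drop (i.toNat + 1)) r).map (fun t => sites[i.toNat] :: t)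
              ++ pvSubseqs (sites.drop (i.toNat + 1)) (r + 1) from rfl]
        rw [List.map_append, List.map_map, List.append_assoc]
        congr 2
        exact List.map_congr_left (fun t _ => by simp)

lemma pvSubseqsB_eq (seq : List String) (r : Nat) : pvSubseqsB seq r = pvSubseqs seq r := by
  unfold pvSubseqsB
  rw [pvCollect_eq (((seq.length : Int) - 0).toNat) seq 0 r [] [] le_rfl le_rfl]
  simp

-- ---------- index-loop enumeration = recursive enumeration ----------

lemma pvL1 (lst : List (String × Int)) {β : Type} (F : (String × Int) → β) :
    ∀ (n a : Nat), lst.length - a ≤ n →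
    (PySem.List.pyRange (a : Int) (lst.length : Int)).map
        (fun k => F (PySem.List.pyGetD lst k ("", 0)))
      = (lst.drop a).map F := by
  intro n
  induction n with
  | zero =>
    intro a ha
    rw [PySem.List.pyRange_one_eq_nil (by omega), List.drop_of_length_le (by omega)]
    rfl
  | succ n ih =>
    intro a ha
    by_cases hlt : a < lst.length
    · rw [PySem.List.pyRange_one_cons (by exact_mod_cast hlt), List.map_cons]
      have hget : PySem.List.pyGetD lst (a : Int) ("", 0) = lst[a] := by
        rw [PySem.List.pyGetD_of_nonneg _ _ (by positivity)]
        simp [List.getElem?_eq_getElem hlt]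
      have hcast : ((a : Int) + 1) = ((a + 1 : Nat) : Int) := by omega
      rw [hget, hcast, ih (a+1) (by omega), List.drop_eq_getElem_cons hlt, List.map_cons]
    · rw [PySem.List.pyRange_one_eq_nil (by omega), List.drop_of_length_le (by omega)]
      rfl

lemma pvL2 (lst : List (String × Int)) :
    ∀ (n a : Nat), lst.length - a ≤ n →
    (PySem.List.pyRange (a : Int) ((lst.length : Int) - 1)).flatMap (fun j =>
      (PySem.List.pyRange (j + 1) (lst.length : Int)).map (fun k =>
        [(PySem.List.pyGetD lst j ("", 0)).1, (PySem.List.pyGetD lst k ("", 0)).1]))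
      = pvSubseqs ((lst.drop a).map (fun p => p.1)) 2 := by
  intro n
  induction n with
  | zero =>
    intro a ha
    rw [PySem.List.pyRange_one_eq_nil (by omega), List.flatMap_nil,
      pvSubseqs_short _ _ (by simp; omega)]
  | succ n ih =>
    intro a ha
    by_cases hlt : a + 1 < lst.length
    · rw [PySem.List.pyRange_one_cons (by omega), List.flatMap_cons]
      have hget : PySem.List.pyGetD lst (a : Int) ("", 0) = lst[a]'(by omega) := by
        rw [PySem.List.pyGetD_of_nonneg _ _ (by positivity)]
        simp [List.getElem?_eq_getElem (by omega : a < lst.length)]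
      have hcast : ((a : Int) + 1) = ((a + 1 : Nat) : Int) := by omega
      rw [hget, hcast, pvL1 lst (fun p => [(lst[a]'(by omega)).1, p.1]) (n) (a+1) (by omega),
        ih (a+1) (by omega), List.drop_eq_getElem_cons (by omega : a < lst.length), List.map_cons]
      simp only [pvSubseqs, pvSubseqs_one, List.map_map]
      rfl
    · rw [PySem.List.pyRange_one_eq_nil (by omega), List.flatMap_nil,
        pvSubseqs_short _ _ (by simp; omega)]

lemma pvL3 (lst : List (String × Int)) :
    ∀ (n a : Nat), lst.length - a ≤ n →
    (PySem.List.pyRange (a : Int) ((lst.length : Int) - 2)).flatMap (fun i =>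
      (PySem.List.pyRange (i + 1) ((lst.length : Int) - 1)).flatMap (fun j =>
        (PySem.List.pyRange (j + 1) (lst.length : Int)).map (fun k =>
          [(PySem.List.pyGetD lst i ("", 0)).1, (PySem.List.pyGetD lst j ("", 0)).1,
           (PySem.List.pyGetD lst k ("", 0)).1])))
      = pvSubseqs ((lst.drop a).map (fun p => p.1)) 3 := by
  intro n
  induction n with
  | zero =>
    intro a ha
    rw [PySem.List.pyRange_one_eq_nil (by omega), List.flatMap_nil,
      pvSubseqs_short _ _ (by simp; omega)]
  | succ n ih =>
    intro a ha
    by_cases hlt : a + 2 < lst.length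
    · rw [PySem.List.pyRange_one_cons (by omega), List.flatMap_cons]
      have hget : PySem.List.pyGetD lst (a : Int) ("", 0) = lst[a]'(by omega) := by
        rw [PySem.List.pyGetD_of_nonneg _ _ (by positivity)]
        simp [List.getElem?_eq_getElem (by omega : a < lst.length)]
      have hcast : ((a : Int) + 1) = ((a + 1 : Nat) : Int) := by omega
      have h2 := pvL2 lst (n) (a+1) (by omega)
      have h2' := congrArg (List.map (fun t => (lst[a]'(by omega)).1 :: t)) h2
      rw [List.map_flatMap] at h2'
      simp only [List.map_map] at h2'
      rw [hget, hcast]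
      rw [show (fun j => (PySem.List.pyRange (j + 1) (lst.length : Int)).map (fun k =>
          [(lst[a]'(by omega)).1, (PySem.List.pyGetD lst j ("", 0)).1,
           (PySem.List.pyGetD lst k ("", 0)).1]))
        = (fun j => ((PySem.List.pyRange (j + 1) (lst.length : Int)).map (fun k =>
            [(PySem.List.pyGetD lst j ("", 0)).1, (PySem.List.pyGetD lst k ("", 0)).1])).map
            (fun t => (lst[a]'(by omega)).1 :: t)) from by
          funext j; rw [List.map_map]; rfl]
      simp only [List.map_map]
      rw [h2', ih (a+1) (by omega), List.drop_eq_getElem_cons (by omega : a < lst.length),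
        List.map_cons]
      simp only [pvSubseqs]
    · rw [PySem.List.pyRange_one_eq_nil (by omega), List.flatMap_nil,
        pvSubseqs_short _ _ (by simp; omega)]

-- ---------- the set-guarded loop processes exactly the new elements ----------

lemma pvFoldSet : ∀ (E : List String) (st : Int × String × PySem.Dict String Int)
    (S : PySem.Set String),
    (E.foldl pvStepASet (st, S)).1 = (pvNewOnes S E).foldl pvStepA st := by
  intro E
  induction E with
  | nil => intro st S; rfl
  | cons r t ih =>
    intro st S
    simp only [List.foldl_cons, pvStepASet, pvNewOnes]
    by_cases h : r ∈ S
    · simp [PySem.Set.contains, h, ih]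
    · simp [PySem.Set.contains, h, ih]

lemma pvSetPrefix : ∀ (E : List String) (S : PySem.Set String), S <+: PySem.Set.update S E := by
  intro E
  induction E with
  | nil => intro S; exact List.prefix_refl S
  | cons x t ih =>
    intro S
    rw [PySem.Set.update_cons]
    refine List.IsPrefix.trans ?_ (ih (S.add x))
    rw [PySem.Set.add_eq_ite]
    split
    · exact List.prefix_refl S
    · exact List.prefix_append S [x]

lemma pvNewOnes_drop : ∀ (E : List String) (S : PySem.Set String),
    pvNewOnes S E = (PySem.Set.update S E).drop S.length := by
  intro E
  induction E with
  | nil => intro S; simp [pvNewOnes, PySem.Set.update]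
  | cons x t ih =>
    intro S
    rw [PySem.Set.update_cons, pvNewOnes]
    by_cases h : x ∈ S
    · rw [if_pos (by simpa [PySem.Set.contains] using h), PySem.Set.add_of_mem h, ih]
    · rw [if_neg (by simpa [PySem.Set.contains] using h), PySem.Set.add_of_not_mem h, ih]
      obtain ⟨rest, hrest⟩ := pvSetPrefix t (S ++ [x])
      rw [← hrest]
      rw [show List.drop (S ++ [x]).length ((S ++ [x]) ++ rest) = rest from List.drop_left]
      rw [List.append_assoc, List.drop_left]
      rfl

lemma pvNewOnes_empty (E : List String) : pvNewOnes PySem.Set.empty E = PySem.Set.ofList E := by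
  rw [pvNewOnes_drop]
  simp [PySem.Set.empty, PySem.Set.update_nil_left]

-- ---------- record characterization ----------

lemma pvGetD_not_contains {ν : Type} (d : PySem.Dict String ν) (k : String)
    (h : d.contains k = false) (d0 : ν) : d.getD k d0 = d0 := by
  have hk : k ∉ d.keys := by
    have := PySem.Dict.contains_eq_decide_mem_keys d k
    rw [h] at this
    simpa using this.symm
  have := (PySem.Dict.get?_eq_none_iff_not_mem_keys d k).mpr hk
  simp [PySem.Dict.getD, this]

lemma pvRecordIf (d : PySem.Dict String Int) (r : String) :
    (if d.contains r then d.modify r 0 (· + 1) else d.insert r 1)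
      = d.insert r (d.getD r 0 + 1) := by
  by_cases h : d.contains r = true
  · simp only [h, if_true, PySem.Dict.modify]
  · have h' : d.contains r = false := by simpa using h
    have h0 : d.getD r 0 = 0 := pvGetD_not_contains _ _ h' _
    simp only [h', Bool.false_eq_true, if_false, h0, zero_add]

lemma pvStepA_record (st : Int × String × PySem.Dict String Int) (r : String) :
    (pvStepA st r).2.2 = st.2.2.insert r (st.2.2.getD r 0 + 1) := by
  unfold pvStepA
  by_cases h : st.2.2.contains r = true
  · simp only [h, if_true, PySem.Dict.modify]
    split_ifs <;> rfl
  · have h' : st.2.2.contains r = false := by simpa using h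
    have h0 : st.2.2.getD r 0 = 0 := pvGetD_not_contains _ _ h' _
    simp only [h', Bool.false_eq_true, if_false, h0, zero_add]
    split_ifs <;> rfl

lemma pvRec : ∀ (E : List String) (st : Int × String × PySem.Dict String Int),
    (E.foldl pvStepA st).2.2 = E.foldl pvInc st.2.2 := by
  intro E
  induction E with
  | nil => intro st; rfl
  | cons r t ih =>
    intro st
    rw [List.foldl_cons, List.foldl_cons, ih, pvStepA_record]
    rfl

-- ---------- per-user reduction of A ----------

lemma pvFold3 {σ : Type} (f : σ → String → σ) (R1 : List Int) (R2 : Int → List Int)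
    (R3 : Int → Int → List Int) (e : Int → Int → Int → String) (s : σ) :
    R1.foldl (fun s i => (R2 i).foldl (fun s j => (R3 i j).foldl (fun s k => f s (e i j k)) s) s) s
      = List.foldl f s (R1.flatMap (fun i => (R2 i).flatMap (fun j => (R3 i j).map (e i j)))) := by
  simp only [List.foldl_flatMap, List.foldl_map]

lemma pvUserA_eq (st : Int × String × PySem.Dict String Int) (lst0 : List (String × Int)) :
    pvUserA st lst0 = (pvEv lst0).foldl pvStepA st := by
  simp only [pvUserA, pvEv]
  rw [pvFold3 pvStepASet _ _ _
    (fun i j k => PySem.Str.join ","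
      [(PySem.List.pyGetD (PySem.List.sorted lst0 (fun x => x.2)) i ("", 0)).1,
       (PySem.List.pyGetD (PySem.List.sorted lst0 (fun x => x.2)) j ("", 0)).1,
       (PySem.List.pyGetD (PySem.List.sorted lst0 (fun x => x.2)) k ("", 0)).1])]
  rw [pvFoldSet, pvNewOnes_empty]
  refine congrArg (fun l : List String => List.foldl pvStepA st (PySem.Set.ofList l)) ?_
  have h3 := pvL3 (PySem.List.sorted lst0 (fun x => x.2))
    (PySem.List.sorted lst0 (fun x => x.2)).length 0 (by omega)
  rw [List.drop_zero] at h3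
  have := congrArg (List.map (fun t => PySem.Str.join "," t)) h3
  rw [List.map_flatMap] at this
  simp only [List.map_flatMap, List.map_map] at this
  simpa [Function.comp] using this

-- ---------- grouping dict relation ----------

lemma pvIfModify {ν : Type} (d : PySem.Dict String ν) (u : String) (dflt : ν) (f : ν → ν) :
    ((if d.contains u then d else d.insert u dflt).modify u dflt f) = d.modify u dflt f := by
  by_cases h : d.contains u = true
  · rw [if_pos h]
  · have h' : d.contains u = false := by simpa using h
    rw [if_neg (by simp [h'])]
    unfold PySem.Dict.modify
    rw [PySem.Dict.getD_insert_self, PySem.Dict.insert_insert_self,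
      pvGetD_not_contains _ _ h']

lemma pvMapVal_contains (d : PySem.Dict String (List (String × Int))) (u : String) :
    (pvMapVal d).contains u = d.contains u := by
  simp [pvMapVal, PySem.Dict.contains, List.any_map, Function.comp_def]

lemma pvMapVal_getD (d : PySem.Dict String (List (String × Int))) (u : String) :
    (pvMapVal d).getD u [] = (d.getD u []).map Prod.swap := by
  simp only [PySem.Dict.getD, PySem.Dict.get?, pvMapVal, List.find?_map]
  have : ((fun p : String × List (Int × String) => p.1 == u) ∘
      (fun p : String × List (String × Int) => (p.1, p.2.map Prod.swap)))
      = (fun p : String × List (String × Int) => p.1 == u) := by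
    funext p; rfl
  rw [this]
  cases List.find? (fun p : String × List (String × Int) => p.1 == u) d.items <;> simp

lemma pvMapVal_insert (d : PySem.Dict String (List (String × Int))) (u : String)
    (v : List (String × Int)) :
    pvMapVal (d.insert u v) = (pvMapVal d).insert u (v.map Prod.swap) := by
  unfold PySem.Dict.insert
  rw [pvMapVal_contains]
  by_cases h : d.contains u = true
  · rw [if_pos h, if_pos h]
    unfold pvMapVal
    simp only [List.map_map]
    refine congrArg PySem.Dict.mk ?_
    refine List.map_congr_left ?_
    intro p _
    by_cases hp : (p.1 == u) = true
    · simp [Function.comp, hp]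
    · simp [Function.comp, hp]
  · rw [if_neg h, if_neg h]
    unfold pvMapVal
    simp

lemma pvGrp : ∀ (z : List (String × String × Int)) (d : PySem.Dict String (List (String × Int))),
    z.foldl (fun (d : PySem.Dict String (List (Int × String))) uwt =>
        d.modify uwt.1 [] (fun l => l ++ [(uwt.2.2, uwt.2.1)])) (pvMapVal d)
      = pvMapVal (z.foldl (fun (d : PySem.Dict String (List (String × Int))) uwt =>
        (if d.contains uwt.1 then d else d.insert uwt.1 []).modify uwt.1 []
          (fun l => l ++ [(uwt.2.1, uwt.2.2)])) d) := by
  intro z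
  induction z with
  | nil => intro d; rfl
  | cons x t ih =>
    intro d
    rw [List.foldl_cons, List.foldl_cons]
    have hstep : (pvMapVal d).modify x.1 [] (fun l => l ++ [(x.2.2, x.2.1)])
        = pvMapVal ((if d.contains x.1 then d else d.insert x.1 []).modify x.1 []
            (fun l => l ++ [(x.2.1, x.2.2)])) := by
      rw [pvIfModify]
      unfold PySem.Dict.modify
      rw [pvMapVal_insert, pvMapVal_getD]
      simp [Prod.swap]
    rw [hstep]
    exact ih _

-- ---------- stable-sort / swap relation ----------

lemma pvInsertBySwap (x : String × Int) (acc : List (String × Int)) :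
    PySem.List.insertBy (fun a b => decide (a.1 < b.1)) x.swap (acc.map Prod.swap)
      = (PySem.List.insertBy (fun a b => decide (a.2 < b.2)) x acc).map Prod.swap := by
  induction acc with
  | nil => rfl
  | cons y ys ih =>
    simp only [List.map_cons, PySem.List.insertBy]
    by_cases h : x.2 < y.2
    · rw [if_pos (by simp [h]), if_pos (by simp [h])]
      rfl
    · rw [if_neg (by simp [h]), if_neg (by simp [h]), ih]
      rfl

lemma pvSortSwap (l : List (String × Int)) :
    PySem.List.sorted (l.map Prod.swap) (fun p => p.1)
      = (PySem.List.sorted l (fun x => x.2)).map Prod.swap := by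
  rw [PySem.List.sorted_eq_foldl_insertBy, PySem.List.sorted_eq_foldl_insertBy]
  rw [List.foldl_map]
  have : ∀ (acc : List (String × Int)),
      l.foldl (fun acc x => PySem.List.insertBy (fun a b => decide (a.1 < b.1)) x.swap acc)
        (acc.map Prod.swap)
      = (l.foldl (fun acc x => PySem.List.insertBy (fun a b => decide (a.2 < b.2)) x acc)
        acc).map Prod.swap := by
    induction l with
    | nil => intro acc; rfl
    | cons y ys ih =>
      intro acc
      rw [List.foldl_cons, List.foldl_cons, ← ih, pvInsertBySwap]
  simpa using this []

-- ---------- the running max/argmin invariant ----------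

lemma pvInv : ∀ (E : List String), E ≠ [] →
    (E.foldl pvStepA ((0 : Int), "", PySem.Dict.empty)).2.1 ∈ E ∧
    ((E.count ((E.foldl pvStepA ((0 : Int), "", PySem.Dict.empty)).2.1) : Int)
      = (E.foldl pvStepA ((0 : Int), "", PySem.Dict.empty)).1) ∧
    ∀ k ∈ E, ((E.count k : Int) ≤ (E.foldl pvStepA ((0 : Int), "", PySem.Dict.empty)).1 ∧
      ((E.count k : Int) = (E.foldl pvStepA ((0 : Int), "", PySem.Dict.empty)).1 →
        (E.foldl pvStepA ((0 : Int), "", PySem.Dict.empty)).2.1 ≤ k)) := by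
  intro E
  induction E using List.reverseRecOn with
  | nil => intro h; exact absurd rfl h
  | append_singleton l r ih =>
    intro _
    have hcount : ∀ k : String, (((l ++ [r]).count k : Nat) : Int)
        = (l.count k : Int) + (if k = r then 1 else 0) := by
      intro k
      rw [List.count_append]
      by_cases hk : k = r
      · subst hk; simp
      · have h0 : List.count k [r] = 0 := List.count_eq_zero_of_not_mem (by simp [hk])
        rw [h0, if_neg hk]
        push_cast
        ring
    rcases eq_or_ne l [] with hl | hl
    · subst hl
      have hstep : pvStepA ((0 : Int), "", PySem.Dict.empty) r
          = (1, r, (PySem.Dict.empty : PySem.Dict String Int).insert r 1) := by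
        unfold pvStepA
        have h1 : (PySem.Dict.empty : PySem.Dict String Int).contains r = false := rfl
        rw [h1]
        simp [PySem.Dict.getD_insert_self]
      simp only [List.nil_append, List.foldl_cons, List.foldl_nil, hstep]
      refine ⟨by simp, by simp, ?_⟩
      intro k hk
      simp only [List.mem_singleton] at hk
      subst hk
      simp
    · obtain ⟨hmem, hcnt, hall⟩ := ih hl
      rw [List.foldl_append, List.foldl_cons, List.foldl_nil]
      set st := l.foldl pvStepA ((0 : Int), "", PySem.Dict.empty) with hst
      have hrec : st.2.2 = l.foldl (fun (c : PySem.Dict String Int) p =>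
          c.insert p (c.getD p 0 + 1)) PySem.Dict.empty := pvRec l _
      have hgetD : st.2.2.getD r 0 = (l.count r : Int) := by
        rw [hrec]
        have := PySem.Dict.getD_foldl_insert_add_one l PySem.Dict.empty r
        simpa using this
      have hmx0 : (0 : Int) ≤ st.1 := by
        rw [← hcnt]; positivity
      have hcr : (l.count r : Int) ≤ st.1 := by
        by_cases hrl : r ∈ l
        · exact (hall r hrl).1
        · rw [List.count_eq_zero_of_not_mem hrl]; exact_mod_cast hmx0
      simp only [pvStepA, pvRecordIf, PySem.Dict.getD_insert_self, hgetD]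
      split_ifs with h1 h2 <;> dsimp only
      · -- record[r] == max_count : cur' = min r cur
        refine ⟨?_, ?_, ?_⟩
        · rcases min_choice r st.2.1 with hm | hm <;> rw [hm]
          · exact List.mem_append_right _ (by simp)
          · exact List.mem_append_left _ hmem
        · rcases min_choice r st.2.1 with hm | hm <;> rw [hm]
          · rw [hcount r]; simp; omega
          · have hne : st.2.1 ≠ r := by
              intro hcontra
              rw [← hcontra] at h1
              omega
            rw [hcount st.2.1, if_neg hne]
            omega
        · intro k hk
          rcases eq_or_ne k r with rfl | hkr
          · rw [hcount k, if_pos rfl]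
            exact ⟨by omega, fun _ => min_le_left _ _⟩
          · have hkl : k ∈ l := by
              rcases List.mem_append.mp hk with h | h
              · exact h
              · simp at h; exact absurd h hkr
            obtain ⟨hle, htie⟩ := hall k hkl
            rw [hcount k, if_neg hkr]
            exact ⟨by omega, fun hh => le_trans (min_le_right _ _) (htie (by omega))⟩
      · -- record[r] > max_count : cur' = r, max' = max + 1
        have hceq : (l.count r : Int) + 1 = st.1 + 1 := by omega
        refine ⟨List.mem_append_right _ (by simp), ?_, ?_⟩
        · rw [hcount r, if_pos rfl]; omega
        · intro k hk
          rcases eq_or_ne k r with rfl | hkr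
          · rw [hcount k, if_pos rfl]
            exact ⟨by omega, fun _ => le_refl _⟩
          · have hkl : k ∈ l := by
              rcases List.mem_append.mp hk with h | h
              · exact h
              · simp at h; exact absurd h hkr
            obtain ⟨hle, _⟩ := hall k hkl
            rw [hcount k, if_neg hkr]
            exact ⟨by omega, fun hh => absurd hh (by omega)⟩
      · -- record[r] < max_count : state unchanged
        have hlt : (l.count r : Int) + 1 < st.1 := by omega
        have hne : st.2.1 ≠ r := by
          intro hcontra
          rw [← hcontra] at hlt
          omega
        refine ⟨List.mem_append_left _ hmem, ?_, ?_⟩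
        · rw [hcount st.2.1, if_neg hne]; omega
        · intro k hk
          rcases eq_or_ne k r with rfl | hkr
          · rw [hcount k, if_pos rfl]
            exact ⟨by omega, fun hh => absurd hh (by omega)⟩
          · have hkl : k ∈ l := by
              rcases List.mem_append.mp hk with h | h
              · exact h
              · simp at h; exact absurd h hkr
            obtain ⟨hle, htie⟩ := hall k hkl
            rw [hcount k, if_neg hkr]
            exact ⟨by omega, fun hh => htie (by omega)⟩

-- ---------- min2? selection ----------

lemma pvMinStep_eq {α κ₁ κ₂ : Type} [LinearOrder κ₁] [LinearOrder κ₂]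
    (xs : List α) (k1 : α → κ₁) (k2 : α → κ₂) :
    PySem.List.min2? xs k1 k2 = xs.foldl (pvMinStep k1 k2) none := by
  unfold PySem.List.min2?
  congr 1
  funext acc x
  cases acc with
  | none => rfl
  | some mm =>
    by_cases h1 : k1 x < k1 mm <;> by_cases h2 : k1 mm < k1 x <;> by_cases h3 : k2 x < k2 mm <;>
      simp [pvMinStep, h1, h2, h3]

lemma pvMin2_aux {α κ₁ κ₂ : Type} [LinearOrder κ₁] [LinearOrder κ₂]
    (k1 : α → κ₁) (k2 : α → κ₂) (m : α) :
    ∀ (xs : List α) (a : α),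
      (∀ y ∈ xs, y = m ∨ (k1 m < k1 y ∨ (k1 m = k1 y ∧ k2 m < k2 y))) →
      (m ∈ xs ∨ a = m) →
      (a = m ∨ (k1 m < k1 a ∨ (k1 m = k1 a ∧ k2 m < k2 a))) →
      xs.foldl (pvMinStep k1 k2) (some a) = some m := by
  intro xs
  induction xs with
  | nil =>
    intro a _ hm ha
    rcases hm with h | rfl
    · cases h
    · rfl
  | cons x t ih =>
    intro a hall hm ha
    rw [List.foldl_cons]
    have hallt : ∀ y ∈ t, y = m ∨ (k1 m < k1 y ∨ (k1 m = k1 y ∧ k2 m < k2 y)) :=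
      fun y hy => hall y (List.mem_cons_of_mem _ hy)
    have hx := hall x (List.mem_cons_self)
    by_cases hxm : x = m
    · rcases ha with ha | hba
      · rw [show pvMinStep k1 k2 (some a) x = some m from by
          rw [hxm, ha]; simp [pvMinStep]]
        exact ih m hallt (Or.inr rfl) (Or.inl rfl)
      · have hcond : k1 x < k1 a ∨ (¬ k1 a < k1 x ∧ k2 x < k2 a) := by
          rw [hxm]
          rcases hba with h | ⟨hh1, hh2⟩
          · exact Or.inl h
          · exact Or.inr ⟨by rw [← hh1]; exact lt_irrefl _, hh2⟩
        rw [show pvMinStep k1 k2 (some a) x = some m from by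
          simp only [pvMinStep]; rw [if_pos hcond, hxm]]
        exact ih m hallt (Or.inr rfl) (Or.inl rfl)
    · have hBx := hx.resolve_left hxm
      by_cases hanem : a = m
      · have hcond : ¬ (k1 x < k1 a ∨ (¬ k1 a < k1 x ∧ k2 x < k2 a)) := by
          rw [hanem]
          rcases hBx with h | ⟨hh1, hh2⟩
          · rintro (c1 | ⟨c2, _⟩)
            · exact lt_asymm h c1
            · exact c2 h
          · rintro (c1 | ⟨_, c3⟩)
            · rw [hh1] at c1; exact lt_irrefl _ c1
            · exact lt_asymm hh2 c3
        rw [show pvMinStep k1 k2 (some a) x = some m from by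
          simp only [pvMinStep]; rw [if_neg hcond, hanem]]
        exact ih m hallt (Or.inr rfl) (Or.inl rfl)
      · have hBa := ha.resolve_left hanem
        have hm' : m ∈ t := by
          rcases hm with hmem | rfl
          · rcases List.mem_cons.mp hmem with h | h
            · exact absurd h.symm hxm
            · exact h
          · exact absurd rfl hanem
        have : pvMinStep k1 k2 (some a) x = some x ∨ pvMinStep k1 k2 (some a) x = some a := by
          simp only [pvMinStep]
          split_ifs <;> simp
        rcases this with hs | hs <;> rw [hs]
        · exact ih x hallt (Or.inl hm') (Or.inr hBx)
        · exact ih a hallt (Or.inl hm') (Or.inr hBa)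

lemma pvMin2_eq {α κ₁ κ₂ : Type} [LinearOrder κ₁] [LinearOrder κ₂]
    (xs : List α) (k1 : α → κ₁) (k2 : α → κ₂) (m : α) (hm : m ∈ xs)
    (hmin : ∀ y ∈ xs, y = m ∨ (k1 m < k1 y ∨ (k1 m = k1 y ∧ k2 m < k2 y))) :
    PySem.List.min2? xs k1 k2 = some m := by
  rw [pvMinStep_eq]
  cases xs with
  | nil => cases hm
  | cons x t =>
    rw [List.foldl_cons, show pvMinStep k1 k2 none x = some x from rfl]
    refine pvMin2_aux k1 k2 m t x (fun y hy => hmin y (List.mem_cons_of_mem _ hy)) ?_ ?_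
    · rcases List.mem_cons.mp hm with h | h
      · exact Or.inr h.symm
      · exact Or.inl h
    · rcases hmin x (List.mem_cons_self) with h | h
      · exact Or.inl h
      · exact Or.inr h

-- ---------- main ----------

lemma pvAfold (T : PySem.Dict String (List (String × Int)))
    (init : Int × String × PySem.Dict String Int) :
    T.items.foldl (fun st p => pvUserA st p.2) init
      = (T.items.flatMap (fun p => pvEv p.2)).foldl pvStepA init := by
  rw [List.foldl_flatMap]
  simp only [pvUserA_eq]

lemma pvBfold (T : PySem.Dict String (List (String × Int))) :
    (pvMapVal T).values.foldl
      (fun (c : PySem.Dict String Int) lst0 =>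
        (PySem.Set.ofList ((pvSubseqsB ((PySem.List.sorted lst0 (fun p => p.1)).map
              (fun p => p.2)) 3).map (fun t => PySem.Str.join "," t))).foldl
          (fun c p => c.insert p (c.getD p 0 + 1)) c) PySem.Dict.empty
    = (T.items.flatMap (fun p => pvEv p.2)).foldl
        (fun (c : PySem.Dict String Int) p => c.insert p (c.getD p 0 + 1)) PySem.Dict.empty := by
  have hvals : (pvMapVal T).values = T.items.map (fun p => p.2.map Prod.swap) := by
    simp [pvMapVal, PySem.Dict.values, List.map_map]
  rw [hvals, List.foldl_map, List.foldl_flatMap]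
  have hfun : (fun (c : PySem.Dict String Int) (x : String × List (String × Int)) =>
      (PySem.Set.ofList ((pvSubseqsB ((PySem.List.sorted (x.2.map Prod.swap) (fun p => p.1)).map
            (fun p => p.2)) 3).map (fun t => PySem.Str.join "," t))).foldl
        (fun c p => c.insert p (c.getD p 0 + 1)) c)
      = (fun (c : PySem.Dict String Int) (x : String × List (String × Int)) =>
        (pvEv x.2).foldl (fun c p => c.insert p (c.getD p 0 + 1)) c) := by
    funext c x
    rw [pvSubseqsB_eq, pvSortSwap, List.map_map]
    rw [show ((fun p : Int × String => p.2) ∘ Prod.swap)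
        = (fun p : String × Int => p.1) from by funext p; rfl]
    rfl
  rw [hfun]

theorem pv_main (username : List String) (timestamp : List Int) (website : List String) :
    mostVisitedPattern username timestamp website = mostVisitedPattern_alt username timestamp website := by
  simp only [mostVisitedPattern, mostVisitedPattern_alt]
  rw [show (List.foldl (fun (d : PySem.Dict String (List (Int × String))) uwt =>
        d.modify uwt.1 [] (fun l => l ++ [(uwt.2.2, uwt.2.1)]))
        PySem.Dict.empty (username.zip (website.zip timestamp)))
      = pvMapVal (List.foldl (fun (d : PySem.Dict String (List (String × Int))) uwt =>
          (if d.contains uwt.1 then d else d.insert uwt.1 []).modify uwt.1 []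
            (fun l => l ++ [(uwt.2.1, uwt.2.2)]))
          PySem.Dict.empty (username.zip (website.zip timestamp))) from pvGrp (username.zip (website.zip timestamp)) PySem.Dict.empty]
  set T := List.foldl (fun (d : PySem.Dict String (List (String × Int))) uwt =>
      (if d.contains uwt.1 then d else d.insert uwt.1 []).modify uwt.1 []
        (fun l => l ++ [(uwt.2.1, uwt.2.2)]))
      PySem.Dict.empty (username.zip (website.zip timestamp)) with hT
  rw [pvAfold, pvBfold]
  set E := T.items.flatMap (fun p => pvEv p.2) with hE
  clear_value E
  rcases eq_or_ne E [] with hEnil | hne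
  · rw [hEnil]
    simp only [List.foldl_nil]
    decide
  · obtain ⟨hmem, hcnt, hall⟩ := pvInv E hne
    set C := E.foldl (fun (c : PySem.Dict String Int) p =>
      c.insert p (c.getD p 0 + 1)) PySem.Dict.empty with hC
    have hkeys : C.keys = PySem.Set.ofList E := by
      rw [hC]
      have := PySem.Dict.keys_foldl_insert E (fun (d : PySem.Dict String Int) x => d.getD x 0 + 1) PySem.Dict.empty
      simpa [PySem.Set.update_nil_left] using this
    have hgd : ∀ v, C.getD v 0 = (E.count v : Int) := by
      intro v
      rw [hC]
      simpa using PySem.Dict.getD_foldl_insert_add_one E PySem.Dict.empty v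
    have hitems : C.items.isEmpty = false := by
      obtain ⟨e, E', rfl⟩ : ∃ e E', E = e :: E' := by
        cases E with
        | nil => exact absurd rfl hne
        | cons e E' => exact ⟨_, _, rfl⟩
      have he : e ∈ C.keys := by
        rw [hkeys]
        exact (PySem.Set.mem_ofList _ _).mpr (by simp)
      rcases hI : C.items with _ | ⟨p, ps⟩
      · rw [show C.keys = C.items.map (fun x => x.1) from rfl, hI] at he
        cases he
      · rfl
    have hmin : PySem.List.min2? C.keys (fun p => -(C.getD p 0)) (fun p => p)
        = some ((E.foldl pvStepA ((0 : Int), "", PySem.Dict.empty)).2.1) := by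
      apply pvMin2_eq
      · rw [hkeys]
        exact (PySem.Set.mem_ofList _ _).mpr hmem
      · intro y hy
        rw [hkeys] at hy
        have hyE : y ∈ E := (PySem.Set.mem_ofList _ _).mp hy
        rcases eq_or_ne y ((E.foldl pvStepA ((0 : Int), "", PySem.Dict.empty)).2.1) with rfl | hne2
        · exact Or.inl rfl
        · obtain ⟨hle, htie⟩ := hall y hyE
          rw [hgd, hgd]
          rcases lt_or_eq_of_le hle with hlt | heq
          · refine Or.inr (Or.inl ?_)
            rw [hcnt]
            omega
          · refine Or.inr (Or.inr ⟨by rw [hcnt, heq], ?_⟩)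
            exact lt_of_le_of_ne (htie heq) (Ne.symm hne2)
    rw [hitems]
    simp only [Bool.false_eq_true, if_false]
    rw [hmin]

-- ===== VERDICT (by name: the statement is the Claim_ definition above) =====
theorem mostVisitedPattern_spec : Claim_equal_mostVisitedPattern := by
  intro u t w _
  unfold Spec_mostVisitedPattern
  exact pv_main u t w
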